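-- pv_equiv track=rewrite | github.com/stefsmeets/focus_package | focus_tools/focus_tools.py | uniquify_invert_dict
-- ===== SOURCE A (Python) =====
-- def uniquify_invert_dict(d):
--     uniq_map = {}
--     counts = {}
--     keys = list(d.keys())
--     keys.sort()
--     for key in keys:
--         values = tuple(d[key])
--         if values in uniq_map:
--             pass
--         else:
--             uniq_map[values] = key
--
--     return uniq_map
-- ===== SOURCE B (Python) =====
-- def uniquify_invert_dict(d):
--     groups = {}
--     for key, values in d.items():
--         vals = tuple(values)
--         groups[vals] = groups.get(vals, []) + [key]
--     result = {vals: min(keys) for vals, keys in groups.items()}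
--     return dict(sorted(result.items(), key=lambda kv: kv[1]))
-- ===== Notes on version B (the rewrite author's own statement) =====
-- stated objective: alternative
-- what changed: A sorts all keys and keeps the first key seen per values-tuple; B groups keys by values-tuple in one pass over the dict, takes min(keys) per group, and sorts only the per-group result by that min key.
import Mathlib
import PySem

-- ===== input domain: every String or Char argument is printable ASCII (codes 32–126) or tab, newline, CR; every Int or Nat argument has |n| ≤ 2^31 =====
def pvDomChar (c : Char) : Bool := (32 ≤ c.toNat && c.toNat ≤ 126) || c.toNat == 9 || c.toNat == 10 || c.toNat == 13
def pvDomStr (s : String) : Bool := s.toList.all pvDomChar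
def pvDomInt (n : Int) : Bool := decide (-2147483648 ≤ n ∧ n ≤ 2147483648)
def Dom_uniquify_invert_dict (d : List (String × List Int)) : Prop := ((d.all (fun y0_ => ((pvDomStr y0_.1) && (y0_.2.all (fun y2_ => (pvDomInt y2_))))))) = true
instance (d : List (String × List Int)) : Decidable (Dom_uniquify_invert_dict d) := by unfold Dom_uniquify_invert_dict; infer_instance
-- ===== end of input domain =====

-- B replaces A's sort-keys-then-first-wins pass by group-keys-by-values-tuple, min per group,
-- then one sort of the (much smaller) result by its min key (objective: alternative).

-- ===== PORT A =====
def uniquify_invert_dict (d : List (String × List Int)) : List (List Int × String) :=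
  let dd : PySem.Dict String (List Int) := PySem.Dict.ofList d
  let keys := PySem.List.sorted dd.keys (fun k => k) false
  let uniq_map := keys.foldl
    (fun (um : PySem.Dict (List Int) String) key =>
      let values := dd.getD key []   -- d[key]: key ∈ dd.keys, so the lookup never raises and the default [] is never used
      if um.contains values then um else um.insert values key)
    PySem.Dict.empty
  uniq_map.items

-- ===== PORT B =====
def uniquify_invert_dict_alt (d : List (String × List Int)) : List (List Int × String) :=
  let dd : PySem.Dict String (List Int) := PySem.Dict.ofList d
  let groups := dd.items.foldl
    (fun (g : PySem.Dict (List Int) (List String)) kv =>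
      g.modify kv.2 [] (fun ks => ks ++ [kv.1]))    -- groups[vals] = groups.get(vals, []) + [key]
    PySem.Dict.empty
  let result := groups.items.map
    (fun p => (p.1, (PySem.List.min? p.2 (fun s => s)).getD ""))   -- min(keys); every group is nonempty, default "" never used
  (PySem.Dict.ofList (PySem.List.sorted result (fun p => p.2) false)).items

-- ===== PRECONDITION & SPEC =====
def Spec_uniquify_invert_dict (d : List (String × List Int)) (out : List (List Int × String)) : Prop := out = uniquify_invert_dict_alt d
instance (d : List (String × List Int)) (out : List (List Int × String)) : Decidable (Spec_uniquify_invert_dict d out) := by unfold Spec_uniquify_invert_dict; infer_instance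

-- ===== CLAIM (what is proved, stated in full; the proofs are below) =====
def Claim_equal_uniquify_invert_dict : Prop := ∀ (d : List (String × List Int)), Dom_uniquify_invert_dict d → Spec_uniquify_invert_dict d (uniquify_invert_dict d)

-- ===== LEMMAS AND PROOFS =====

-- the first-occurrence selection A's loop performs, as a pure recursion
def pvFo (v : String → List Int) : List String → List (List Int) → List (List Int × String)
  | [], _ => []
  | k :: rest, seen =>
    if v k ∈ seen then pvFo v rest seen
    else (v k, k) :: pvFo v rest (v k :: seen)

theorem pvFo_congr (v : String → List Int) (S : List String) (s s' : List (List Int))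
    (h : ∀ c, c ∈ s ↔ c ∈ s') : pvFo v S s = pvFo v S s' := by
  induction S generalizing s s' with
  | nil => rfl
  | cons k rest ih =>
    simp only [pvFo]
    by_cases hm : v k ∈ s
    · rw [if_pos hm, if_pos ((h _).mp hm)]; exact ih s s' h
    · rw [if_neg hm, if_neg (fun hx => hm ((h _).mpr hx))]
      congr 1
      exact ih _ _ (by intro c; simp [h c])

theorem pvFo_snd_sublist (v : String → List Int) (S : List String) (seen : List (List Int)) :
    ((pvFo v S seen).map (·.2)).Sublist S := by
  induction S generalizing seen with
  | nil => simp [pvFo]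
  | cons k rest ih =>
    simp only [pvFo]
    by_cases hm : v k ∈ seen
    · rw [if_pos hm]; exact (ih seen).cons k
    · rw [if_neg hm]; simpa using (ih (v k :: seen)).cons₂ k

theorem pvFo_fst_mem (v : String → List Int) (S : List String) (seen : List (List Int)) (c : List Int) :
    c ∈ (pvFo v S seen).map (·.1) ↔ (c ∈ S.map v ∧ c ∉ seen) := by
  induction S generalizing seen with
  | nil => simp [pvFo]
  | cons k rest ih =>
    simp only [pvFo]
    by_cases hm : v k ∈ seen
    · rw [if_pos hm]
      rw [ih]
      simp only [List.map_cons, List.mem_cons]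
      constructor
      · rintro ⟨h1, h2⟩; exact ⟨Or.inr h1, h2⟩
      · rintro ⟨h1 | h1, h2⟩
        · exact absurd (h1 ▸ hm) h2
        · exact ⟨h1, h2⟩
    · rw [if_neg hm]
      simp only [List.map_cons, List.mem_cons, ih]
      constructor
      · rintro (rfl | ⟨h1, h2⟩)
        · exact ⟨Or.inl rfl, hm⟩
        · exact ⟨Or.inr h1, fun hs => h2 (Or.inr hs)⟩
      · rintro ⟨h1 | h1, h2⟩
        · exact Or.inl h1
        · by_cases hc : c = v k
          · exact Or.inl hc
          · exact Or.inr ⟨h1, by simp [hc, h2]⟩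

theorem pvFo_mem (v : String → List Int) (S : List String) (seen : List (List Int))
    (hp : S.Pairwise (· < ·)) :
    ∀ p ∈ pvFo v S seen, p.2 ∈ S ∧ v p.2 = p.1 ∧ p.1 ∉ seen ∧
      ∀ k' ∈ S, v k' = p.1 → p.2 ≤ k' := by
  induction S generalizing seen with
  | nil => simp [pvFo]
  | cons k rest ih =>
    simp only [pvFo]
    have hp' := (List.pairwise_cons.mp hp).2
    have hlt := (List.pairwise_cons.mp hp).1
    by_cases hm : v k ∈ seen
    · rw [if_pos hm]
      intro p hpmem
      obtain ⟨h1, h2, h3, h4⟩ := ih seen hp' p hpmem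
      refine ⟨List.mem_cons_of_mem _ h1, h2, h3, ?_⟩
      intro k' hk' hv
      rcases List.mem_cons.mp hk' with rfl | hk'
      · exact (h3 (hv ▸ hm)).elim
      · exact h4 k' hk' hv
    · rw [if_neg hm]
      intro p hpmem
      rcases List.mem_cons.mp hpmem with rfl | hpmem
      · refine ⟨List.mem_cons_self, rfl, hm, ?_⟩
        intro k' hk' _
        rcases List.mem_cons.mp hk' with rfl | hk'
        · exact le_refl _
        · exact le_of_lt (hlt k' hk')
      · obtain ⟨h1, h2, h3, h4⟩ := ih (v k :: seen) hp' p hpmem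
        have h3' : p.1 ∉ seen := fun h => h3 (List.mem_cons_of_mem _ h)
        refine ⟨List.mem_cons_of_mem _ h1, h2, h3', ?_⟩
        intro k' hk' hv
        rcases List.mem_cons.mp hk' with rfl | hk'
        · exact absurd hv (fun h => h3 (h ▸ List.mem_cons_self))
        · exact h4 k' hk' hv

theorem pvFo_fst_nodup (v : String → List Int) (S : List String) (seen : List (List Int))
    (hp : S.Pairwise (· < ·)) : ((pvFo v S seen).map (·.1)).Nodup := by
  induction S generalizing seen with
  | nil => simp [pvFo]
  | cons k rest ih =>
    have hp' := (List.pairwise_cons.mp hp).2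
    simp only [pvFo]
    by_cases hm : v k ∈ seen
    · rw [if_pos hm]; exact ih seen hp'
    · rw [if_neg hm]
      simp only [List.map_cons, List.nodup_cons]
      refine ⟨?_, ih (v k :: seen) hp'⟩
      intro hmem
      exact ((pvFo_fst_mem v rest (v k :: seen) (v k)).mp hmem).2 List.mem_cons_self

theorem pv_items_ofList (l : List (List Int × String)) (h : (l.map Prod.fst).Nodup) :
    (PySem.Dict.ofList l).items = l := by
  have : PySem.Dict.ofList l = l.foldl (fun d p => d.insert p.1 p.2) PySem.Dict.empty := rfl
  rw [this]
  have := PySem.Dict.items_foldl_insert_fresh (l := l) (k := Prod.fst) (v := Prod.snd)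
    (d := PySem.Dict.empty) (by intro a _; simp [PySem.Dict.contains_empty]) h
  simpa using this

theorem pvFo_foldl (v : String → List Int) (S : List String) (um : PySem.Dict (List Int) String) :
    (S.foldl
      (fun (um : PySem.Dict (List Int) String) key =>
        let values := v key
        if um.contains values then um else um.insert values key) um).items
      = um.items ++ pvFo v S um.keys := by
  induction S generalizing um with
  | nil => simp [pvFo]
  | cons k rest ih =>
    simp only [List.foldl_cons, pvFo]
    by_cases h : um.contains (v k) = true
    · have hmem : v k ∈ um.keys := (PySem.Dict.contains_iff_mem_keys _ _).mp h
      rw [if_pos hmem]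
      simpa [h] using ih um
    · have hnc : um.contains (v k) = false := by simpa using h
      have hmem : v k ∉ um.keys := fun hm => h ((PySem.Dict.contains_iff_mem_keys _ _).mpr hm)
      rw [if_neg hmem]
      have := ih (um.insert (v k) k)
      simp only [hnc, Bool.false_eq_true, if_false] at this ⊢
      rw [this, PySem.Dict.items_insert_of_not_contains _ _ hnc,
        PySem.Dict.keys_insert_of_not_contains _ _ hnc,
        pvFo_congr v rest (um.keys ++ [v k]) (v k :: um.keys) (by intro c; simp [or_comm]),
        List.append_assoc]
      simp

theorem pv_core (dd : PySem.Dict String (List Int)) (hnd : dd.keys.Nodup) :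
    ((PySem.List.sorted dd.keys (fun k => k) false).foldl
      (fun (um : PySem.Dict (List Int) String) key =>
        let values := dd.getD key []
        if um.contains values then um else um.insert values key)
      PySem.Dict.empty).items
    = (PySem.Dict.ofList (PySem.List.sorted
        ((dd.items.foldl (fun (g : PySem.Dict (List Int) (List String)) kv =>
            g.modify kv.2 [] (fun ks => ks ++ [kv.1])) PySem.Dict.empty).items.map
          (fun p => (p.1, (PySem.List.min? p.2 (fun s => s)).getD "")))
        (fun p => p.2) false)).items := by
  have hKnd : dd.keys.Nodup := hnd
  set f : String → List Int := fun k => dd.getD k [] with hf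
  set K := dd.keys with hK
  set S := PySem.List.sorted K (fun k => k) false with hS
  have hSperm : S.Perm K := PySem.List.sorted_perm K (fun k => k) false
  have hSnd : S.Nodup := hSperm.nodup_iff.mpr hKnd
  have hSlt : S.Pairwise (· < ·) := by
    have hSle : S.Pairwise (fun a b => a ≤ b) := PySem.List.sorted_pairwise K (fun k => k)
    exact (hSle.and hSnd).imp (fun h => lt_of_le_of_ne h.1 h.2)
  -- A side
  have hA : ((S.foldl
      (fun (um : PySem.Dict (List Int) String) key =>
        let values := dd.getD key []
        if um.contains values then um else um.insert values key)
      PySem.Dict.empty).items : List (List Int × String)) = pvFo f S [] := by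
    have := pvFo_foldl f S PySem.Dict.empty
    simp only [hf] at this
    simpa [PySem.Dict.keys_empty] using this
  rw [hA]
  -- B side: groups
  set G : List Int → List String := fun c => K.filter (fun k => f k == c) with hG
  set μ : List Int → String := fun c => (PySem.List.min? (G c) (fun s => s)).getD "" with hμ
  have hitems : dd.items = K.map (fun k => (k, f k)) := PySem.Dict.items_eq_map_keys dd hKnd []
  set groups := dd.items.foldl (fun (g : PySem.Dict (List Int) (List String)) kv =>
      g.modify kv.2 [] (fun ks => ks ++ [kv.1])) PySem.Dict.empty with hgroups
  have hGnd : groups.keys.Nodup := by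
    have := PySem.Dict.nodup_keys_foldl_modify_key dd.items (fun kv => kv.2) []
      (fun _ kv ks => ks ++ [kv.1]) PySem.Dict.empty (by simp [PySem.Dict.keys_empty])
    simpa using this
  have hGkeys : groups.keys = PySem.Set.ofList (K.map f) := by
    have := PySem.Dict.keys_foldl_modify_key dd.items (fun kv => kv.2) []
      (fun _ kv ks => ks ++ [kv.1]) PySem.Dict.empty
    rw [hgroups]
    rw [show (List.foldl (fun (g : PySem.Dict (List Int) (List String)) kv =>
        g.modify kv.2 [] (fun ks => ks ++ [kv.1])) PySem.Dict.empty dd.items).keys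
      = PySem.Set.update (PySem.Dict.empty : PySem.Dict (List Int) (List String)).keys
          (dd.items.map (fun kv => kv.2)) from this]
    rw [hitems]
    simp [List.map_map, PySem.Dict.keys_empty, PySem.Set.update_nil_left, Function.comp_def]
  have hGgetD : ∀ c, groups.getD c [] = G c := by
    intro c
    have hswap : groups = (dd.items.map (fun kv => (kv.2, kv.1))).foldl
        (fun d p => d.modify p.1 [] (fun x => x ++ [p.2])) PySem.Dict.empty := by
      rw [List.foldl_map]
    rw [hswap, PySem.Dict.getD_foldl_modify_append]
    rw [hitems]
    simp [List.map_map, List.filter_map, hG, Function.comp_def]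
  have hresult : groups.items.map (fun p => (p.1, (PySem.List.min? p.2 (fun s => s)).getD ""))
      = (PySem.Set.ofList (K.map f)).map (fun c => (c, μ c)) := by
    rw [PySem.Dict.items_eq_map_keys groups hGnd []]
    rw [List.map_map]
    rw [← hGkeys]
    apply List.map_congr_left
    intro c _
    simp [Function.comp, hGgetD c, hμ]
  -- characterize A's list elementwise
  have hAchar : ∀ p ∈ pvFo f S [], p = (p.1, μ p.1) := by
    rintro ⟨c, k⟩ hp
    obtain ⟨h1, h2, _, h4⟩ := pvFo_mem f S [] hSlt _ hp
    simp only at h1 h2 h4 ⊢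
    have hmemG : k ∈ G c := by
      rw [hG]
      refine List.mem_filter.mpr ⟨(PySem.List.mem_sorted K (fun k => k) false k).mp h1, by simp [h2]⟩
    obtain ⟨m, hm⟩ : ∃ m, PySem.List.min? (G c) (fun s => s) = some m := by
      cases hmin : PySem.List.min? (G c) (fun s => s) with
      | none => exact absurd ((PySem.List.min?_eq_none_iff _ _).mp hmin ▸ hmemG) (List.not_mem_nil)
      | some m => exact ⟨m, rfl⟩
    have hmG := PySem.List.min?_mem hm
    have hmK : m ∈ K := (List.mem_filter.mp hmG).1
    have hmv : f m = c := by simpa using (List.mem_filter.mp hmG).2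
    have h5 : m ≤ k := PySem.List.min?_isMin hm k hmemG
    have h6 : k ≤ m := h4 m ((PySem.List.mem_sorted K (fun k => k) false m).mpr hmK) hmv
    have : μ c = k := by rw [hμ]; simp [hm]; exact le_antisymm h5 h6
    simp [this]
  have hAeq : pvFo f S [] = ((pvFo f S []).map (fun p => p.1)).map (fun c => (c, μ c)) := by
    rw [List.map_map]
    conv_lhs => rw [← List.map_id (pvFo f S [])]
    exact List.map_congr_left (fun p hp => by simpa using hAchar p hp)
  -- perm of the fst lists
  have hfstperm : ((pvFo f S []).map (fun p => p.1)).Perm (PySem.Set.ofList (K.map f)) := by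
    refine (List.perm_ext_iff_of_nodup (pvFo_fst_nodup f S [] hSlt) (PySem.Set.nodup_ofList _)).mpr ?_
    intro c
    rw [pvFo_fst_mem, PySem.Set.mem_ofList]
    simp [(hSperm.map f).mem_iff]
  have hperm : (groups.items.map (fun p => (p.1, (PySem.List.min? p.2 (fun s => s)).getD ""))).Perm
      (pvFo f S []) := by
    rw [hresult, hAeq]
    exact (hfstperm.map (fun c => (c, μ c))).symm
  have hpair : (pvFo f S []).Pairwise (fun a b => a.2 < b.2) :=
    List.pairwise_map.mp (List.Pairwise.sublist (pvFo_snd_sublist f S []) hSlt)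
  rw [PySem.List.sorted_eq_of_perm_of_pairwise_lt _ _ (fun p => p.2) hperm.symm hpair]
  exact (pv_items_ofList _ (pvFo_fst_nodup f S [] hSlt)).symm

-- ===== VERDICT (by name: the statement is the Claim_ definition above) =====
theorem uniquify_invert_dict_spec : Claim_equal_uniquify_invert_dict := by
  intro d _
  exact pv_core (PySem.Dict.ofList d) (PySem.Dict.nodup_keys_ofList d)
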